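-- pv_equiv track=rewrite | github.com/jhroutzong/Auburn-University-Coursework | python/Project 2/list_tools.py | max_from_2_tuples
-- ===== SOURCE A (Python) =====
-- def max_from_2_tuples(tuples):
--     """#3 returns a tuple that is a max of each tuple element (1st, 2nd) from a list of tuples."""
--     if not tuples:
--         return
--     else:
--         length = len(tuples)
--         x = 1
--         y = tuples[0][0]
--         z = tuples[0][1]
--         while x < length:
--             if tuples[x][0] > y:
--                 y = tuples[x][0]
--             if tuples[x][1] > z:
--                 z = tuples[x][1]
--             x = x + 1
--         return (y, z)
-- ===== SOURCE B (Python) =====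
-- def max_from_2_tuples(tuples):
--     """#3 returns a tuple that is a max of each tuple element (1st, 2nd) from a list of tuples."""
--     if not tuples:
--         return
--     return (max(t[0] for t in tuples), max(t[1] for t in tuples))
-- ===== Notes on version B (the rewrite author's own statement) =====
-- stated objective: idiomatic
-- what changed: Replaces the single index-driven while loop maintaining both running maxima with two independent builtin max reductions, one per tuple column.
import Mathlib
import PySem

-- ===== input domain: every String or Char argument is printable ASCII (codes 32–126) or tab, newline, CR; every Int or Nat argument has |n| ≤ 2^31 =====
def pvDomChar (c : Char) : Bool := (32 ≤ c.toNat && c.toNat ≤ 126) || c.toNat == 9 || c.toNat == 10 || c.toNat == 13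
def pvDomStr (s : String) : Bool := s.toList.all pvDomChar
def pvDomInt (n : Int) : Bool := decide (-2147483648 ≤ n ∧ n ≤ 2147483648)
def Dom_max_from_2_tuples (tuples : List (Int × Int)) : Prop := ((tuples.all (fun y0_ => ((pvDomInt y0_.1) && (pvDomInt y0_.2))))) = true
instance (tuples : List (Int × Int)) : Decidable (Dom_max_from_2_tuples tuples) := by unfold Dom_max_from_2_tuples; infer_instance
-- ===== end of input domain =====

-- B replaces A's single interleaved while loop with two independent builtin max
-- reductions, one per tuple column (objective: idiomatic; same O(n) cost).

-- ===== PORT A =====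
-- the 'while x < length' loop: fold over the tail, updating (y, z) as A does
def max_from_2_tuples (tuples : List (Int × Int)) : Option (Int × Int) :=
  match tuples with
  | [] => none
  | t0 :: rest =>
    some (rest.foldl
      (fun (yz : Int × Int) t =>
        (if t.1 > yz.1 then t.1 else yz.1, if t.2 > yz.2 then t.2 else yz.2))
      (t0.1, t0.2))

-- ===== PORT B =====
def max_from_2_tuples_alt (tuples : List (Int × Int)) : Option (Int × Int) :=
  if tuples.isEmpty then none
  else
    some ((PySem.List.max? (tuples.map (fun t => t.1)) (fun y => y)).getD 0,
          (PySem.List.max? (tuples.map (fun t => t.2)) (fun y => y)).getD 0)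

-- ===== PRECONDITION & SPEC =====
def Spec_max_from_2_tuples (tuples : List (Int × Int)) (out : Option (Int × Int)) : Prop := out = max_from_2_tuples_alt tuples
instance (tuples : List (Int × Int)) (out : Option (Int × Int)) : Decidable (Spec_max_from_2_tuples tuples out) := by unfold Spec_max_from_2_tuples; infer_instance

-- ===== CLAIM (what is proved, stated in full; the proofs are below) =====
def Claim_equal_max_from_2_tuples : Prop := ∀ (tuples : List (Int × Int)), Dom_max_from_2_tuples tuples → Spec_max_from_2_tuples tuples (max_from_2_tuples tuples)

-- ===== LEMMAS AND PROOFS =====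
-- A's interleaved loop computes the two column-wise running maxima
theorem loop_eq (rest : List (Int × Int)) (a b : Int) :
    rest.foldl
      (fun (yz : Int × Int) t =>
        (if t.1 > yz.1 then t.1 else yz.1, if t.2 > yz.2 then t.2 else yz.2))
      (a, b)
    = ((rest.map (fun t => t.1)).foldl max a, (rest.map (fun t => t.2)).foldl max b) := by
  induction rest generalizing a b with
  | nil => simp
  | cons t rest ih =>
    simp only [List.foldl_cons, List.map_cons]
    rw [show (if t.1 > a then t.1 else a) = max a t.1 from by rw [max_def]; split_ifs <;> omega,
        show (if t.2 > b then t.2 else b) = max b t.2 from by rw [max_def]; split_ifs <;> omega, ih]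

theorem max_from_2_tuples_spec : Claim_equal_max_from_2_tuples := by
  intro tuples _
  unfold Spec_max_from_2_tuples max_from_2_tuples max_from_2_tuples_alt
  cases tuples with
  | nil => rfl
  | cons t0 rest =>
    simp only [List.isEmpty_cons, Bool.false_eq_true, if_false]
    rw [loop_eq]
    simp [PySem.List.max?_id_cons]
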